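-- pv_equiv track=rewrite | github.com/wuwuarandhg/Pan1Watch | src/core/schedule_parser.py | _compress_ints_to_cron_ranges
-- ===== SOURCE A (Python) =====
-- from typing import Iterable
--
-- def _compress_ints_to_cron_ranges(values: Iterable[int]) -> str:
--     nums = sorted(set(values))
--     if not nums:
--         return ""
--
--     ranges: list[str] = []
--     start = prev = nums[0]
--     for n in nums[1:]:
--         if n == prev + 1:
--             prev = n
--             continue
--         if start == prev:
--             ranges.append(str(start))
--         else:
--             ranges.append(f"{start}-{prev}")
--         start = prev = n
--
--     if start == prev:
--         ranges.append(str(start))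
--     else:
--         ranges.append(f"{start}-{prev}")
--
--     return ",".join(ranges)
-- ===== SOURCE B (Python) =====
-- from typing import Iterable
--
--
-- def _compress_ints_to_cron_ranges(values: Iterable[int]) -> str:
--     # Boundary detection: a value starts a run iff its predecessor is absent
--     # from the set, and ends a run iff its successor is absent.  Sorting the
--     # run-starts and run-ends independently and zipping them pairs each start
--     # with the end of its own run (runs are disjoint intervals).
--     s = set(values)
--     starts = sorted(n for n in s if n - 1 not in s)
--     ends = sorted(n for n in s if n + 1 not in s)
--     return ",".join(str(a) if a == b else f"{a}-{b}" for a, b in zip(starts, ends))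
-- ===== Notes on version B (the rewrite author's own statement) =====
-- stated objective: alternative
-- what changed: B replaces A's sequential start/prev scan with set-membership boundary detection: a value is a run start iff n-1 is not in the set and a run end iff n+1 is not, so B sorts the starts and ends independently and zips them, with no adjacency scan at all.
import Mathlib
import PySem

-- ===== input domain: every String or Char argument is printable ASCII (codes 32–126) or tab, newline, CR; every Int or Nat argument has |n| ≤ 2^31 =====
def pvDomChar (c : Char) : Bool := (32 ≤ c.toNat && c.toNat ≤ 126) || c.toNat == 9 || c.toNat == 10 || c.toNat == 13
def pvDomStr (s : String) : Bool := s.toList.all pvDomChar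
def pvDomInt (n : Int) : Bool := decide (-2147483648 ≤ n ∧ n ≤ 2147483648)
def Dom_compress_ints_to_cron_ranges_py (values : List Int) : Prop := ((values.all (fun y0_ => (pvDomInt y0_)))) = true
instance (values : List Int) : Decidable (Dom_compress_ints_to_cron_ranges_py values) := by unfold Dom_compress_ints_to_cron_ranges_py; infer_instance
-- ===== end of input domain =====

-- B detects run boundaries by set membership (n-1/n+1 absent) and zips the sorted
-- starts with the sorted ends, instead of A's sequential start/prev scan: alternative algorithm.


-- ===== PORT A =====
-- loop body of A's for-loop; state = (start, prev, ranges)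
def pvAStep (st : Int × Int × List String) (n : Int) : Int × Int × List String :=
  if n = st.2.1 + 1 then (st.1, n, st.2.2)
  else (n, n, st.2.2 ++ [if st.1 = st.2.1 then PySem.Int.toStr st.1
        else PySem.Int.toStr st.1 ++ "-" ++ PySem.Int.toStr st.2.1])

def compress_ints_to_cron_ranges_py (values : List Int) : String :=
  let nums := PySem.List.sorted (PySem.Set.ofList values) (fun x => x) false
  match nums with
  | [] => ""
  | x :: rest =>
    let st := rest.foldl pvAStep (x, x, ([] : List String))
    PySem.Str.join "," (st.2.2 ++ [if st.1 = st.2.1 then PySem.Int.toStr st.1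
        else PySem.Int.toStr st.1 ++ "-" ++ PySem.Int.toStr st.2.1])

-- ===== PORT B =====
-- B's per-pair formatter: str(a) if a == b else f"{a}-{b}"
def pvFmtPair (p : Int × Int) : String :=
  if p.1 = p.2 then PySem.Int.toStr p.1
  else PySem.Int.toStr p.1 ++ "-" ++ PySem.Int.toStr p.2

def compress_ints_to_cron_ranges_py_alt (values : List Int) : String :=
  let s := PySem.Set.ofList values
  let starts := PySem.List.sorted
      (s.filter (fun n => !(PySem.Set.contains s (n - 1)))) (fun x => x) false
  let ends := PySem.List.sorted
      (s.filter (fun n => !(PySem.Set.contains s (n + 1)))) (fun x => x) false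
  PySem.Str.join "," ((starts.zip ends).map pvFmtPair)

-- ===== PRECONDITION & SPEC =====
def Spec_compress_ints_to_cron_ranges_py (values : List Int) (out : String) : Prop := out = compress_ints_to_cron_ranges_py_alt values
instance (values : List Int) (out : String) : Decidable (Spec_compress_ints_to_cron_ranges_py values out) := by unfold Spec_compress_ints_to_cron_ranges_py; infer_instance

-- ===== CLAIM (what is proved, stated in full; the proofs are below) =====
def Claim_equal_compress_ints_to_cron_ranges_py : Prop := ∀ (values : List Int), Dom_compress_ints_to_cron_ranges_py values → Spec_compress_ints_to_cron_ranges_py values (compress_ints_to_cron_ranges_py values)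

-- ===== LEMMAS AND PROOFS =====
-- run starts of a strictly-increasing list, given the previous element p
def pvSt : Int → List Int → List Int
  | _, [] => []
  | p, x :: t => if x = p + 1 then pvSt x t else x :: pvSt x t

-- run ends of a strictly-increasing list p :: l
def pvEn : Int → List Int → List Int
  | p, [] => [p]
  | p, x :: t => if x = p + 1 then pvEn x t else p :: pvEn x t

-- A's ranges list after the loop, with the pending (start, prev) run flushed
def pvFlushA (st : Int × Int × List String) : List String :=
  st.2.2 ++ [pvFmtPair (st.1, st.2.1)]

lemma pv_loop_zip (t : List Int) : ∀ (rs : List String) (s p : Int),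
    pvFlushA (t.foldl pvAStep (s, p, rs))
      = rs ++ ((s :: pvSt p t).zip (pvEn p t)).map pvFmtPair := by
  induction t with
  | nil => intro rs s p; simp [pvFlushA, pvSt, pvEn]
  | cons n t ih =>
    intro rs s p
    simp only [List.foldl_cons]
    by_cases h : n = p + 1
    · have hA : pvAStep (s, p, rs) n = (s, n, rs) := by simp [pvAStep, h]
      rw [hA, ih rs s n]
      simp [pvSt, pvEn, h]
    · have hA : pvAStep (s, p, rs) n = (n, n, rs ++ [pvFmtPair (s, p)]) := by
        simp [pvAStep, pvFmtPair, h]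
      rw [hA, ih (rs ++ [pvFmtPair (s, p)]) n n]
      simp [pvSt, pvEn, h, List.zip]

-- nothing of a strictly increasing pre ++ p :: l lies strictly between p and l's values
lemma pv_not_mem_between (pre l : List Int) (p m : Int)
    (hfp : (pre ++ p :: l).Pairwise (· < ·))
    (hlow : p < m) (hup : ∀ y ∈ l, m < y) : m ∉ pre ++ p :: l := by
  intro hmem
  rcases List.mem_append.mp hmem with h1 | h1
  · have := (List.pairwise_append.mp hfp).2.2 m h1 p (List.mem_cons_self ..)
    omega
  · rcases List.mem_cons.mp h1 with h2 | h2
    · omega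
    · have := hup m h2; omega

lemma pv_filter_starts (full : List Int) (hfp : full.Pairwise (· < ·)) :
    ∀ (l pre : List Int) (p : Int), full = pre ++ p :: l →
      l.filter (fun n => !(full.contains (n - 1))) = pvSt p l := by
  intro l
  induction l with
  | nil => intro pre p _; simp [pvSt]
  | cons x t ih =>
    intro pre p hfull
    have hfp' : (pre ++ p :: x :: t).Pairwise (· < ·) := hfull ▸ hfp
    have hsuf : (p :: x :: t).Pairwise (· < ·) :=
      ((List.pairwise_append).mp hfp').2.1
    have hpx : p < x := (List.pairwise_cons.mp hsuf).1 x (List.mem_cons_self ..)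
    have hxt : ∀ y ∈ t, x < y :=
      (List.pairwise_cons.mp (List.pairwise_cons.mp hsuf).2).1
    by_cases h : x = p + 1
    · have hin : x - 1 ∈ full := by
        rw [hfull]
        have hxp : x - 1 = p := by omega
        rw [hxp]
        exact List.mem_append_right _ (List.mem_cons_self ..)
      rw [List.filter_cons_of_neg (by simp [hin])]
      rw [ih (pre ++ [p]) x (by simp [hfull])]
      simp [pvSt, h]
    · have hout : x - 1 ∉ full := by
        rw [hfull]
        refine pv_not_mem_between pre (x :: t) p (x - 1) hfp'
          (by omega) ?_
        intro y hy
        rcases List.mem_cons.mp hy with h2 | h2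
        · omega
        · have := hxt y h2; omega
      rw [List.filter_cons_of_pos (by simp [hout])]
      rw [ih (pre ++ [p]) x (by simp [hfull])]
      simp [pvSt, h]

lemma pv_filter_ends (full : List Int) (hfp : full.Pairwise (· < ·)) :
    ∀ (l pre : List Int) (p : Int), full = pre ++ p :: l →
      (p :: l).filter (fun n => !(full.contains (n + 1))) = pvEn p l := by
  intro l
  induction l with
  | nil =>
    intro pre p hfull
    have hout : p + 1 ∉ full := by
      rw [hfull]
      exact fun hc => pv_not_mem_between pre [] p (p + 1) (hfull ▸ hfp)
        (by omega) (by simp) hc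
    simp [pvEn, hout]
  | cons x t ih =>
    intro pre p hfull
    have hfp' : (pre ++ p :: x :: t).Pairwise (· < ·) := hfull ▸ hfp
    have hsuf : (p :: x :: t).Pairwise (· < ·) :=
      ((List.pairwise_append).mp hfp').2.1
    have hpx : p < x := (List.pairwise_cons.mp hsuf).1 x (List.mem_cons_self ..)
    have hxt : ∀ y ∈ t, x < y :=
      (List.pairwise_cons.mp (List.pairwise_cons.mp hsuf).2).1
    by_cases h : x = p + 1
    · have hin : p + 1 ∈ full := by
        rw [hfull, ← h]
        exact List.mem_append_right _ (List.mem_cons_of_mem _ (List.mem_cons_self ..))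
      rw [List.filter_cons_of_neg (by simp [hin])]
      rw [ih (pre ++ [p]) x (by simp [hfull])]
      simp [pvEn, h]
    · have hout : p + 1 ∉ full := by
        rw [hfull]
        refine pv_not_mem_between pre (x :: t) p (p + 1) hfp'
          (by omega) ?_
        intro y hy
        rcases List.mem_cons.mp hy with h2 | h2
        · omega
        · have := hxt y h2; omega
      rw [List.filter_cons_of_pos (by simp [hout])]
      rw [ih (pre ++ [p]) x (by simp [hfull])]
      simp [pvEn, h]

-- sorting B's set-filter is the same as filtering the sorted distinct list
lemma pv_sorted_filter (values : List Int) (P : Int → Bool) :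
    PySem.List.sorted ((PySem.Set.ofList values).filter P) (fun x => x) false
      = (PySem.List.sorted (PySem.Set.ofList values) (fun x => x) false).filter P := by
  apply PySem.List.sorted_eq_of_perm_of_pairwise_lt
  · exact (PySem.List.sorted_perm (PySem.Set.ofList values) (fun x => x) false).filter P
  · exact (PySem.List.sorted_ofList_pairwise_lt values).filter P

-- ===== VERDICT (by name: the statement is the Claim_ definition above) =====
theorem compress_ints_to_cron_ranges_py_spec : Claim_equal_compress_ints_to_cron_ranges_py := by
  intro values _
  unfold Spec_compress_ints_to_cron_ranges_py
  unfold compress_ints_to_cron_ranges_py compress_ints_to_cron_ranges_py_alt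
  simp only
  have hperm := PySem.List.sorted_perm (PySem.Set.ofList values) (fun x => x) false
  have hpair := PySem.List.sorted_ofList_pairwise_lt values
  rw [pv_sorted_filter, pv_sorted_filter]
  cases hn : PySem.List.sorted (PySem.Set.ofList values) (fun x => x) false with
  | nil => simp [PySem.Str.join]
  | cons x rest =>
    rw [hn] at hpair hperm
    -- the Set-membership tests coincide with membership in the sorted distinct list
    have hfun : ∀ c : Int, (fun n : Int => !(PySem.Set.contains (PySem.Set.ofList values) (n + c)))
        = (fun n : Int => !((x :: rest).contains (n + c))) := by
      intro c; funext n
      simp only [PySem.Set.contains_eq_listContains]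
      have hc : (n + c ∈ PySem.Set.ofList values) ↔ (n + c ∈ x :: rest) :=
        hperm.mem_iff.symm
      by_cases hm : n + c ∈ x :: rest
      · rw [List.contains_iff_mem.mpr (hc.mpr hm), List.contains_iff_mem.mpr hm]
      · have h1 : n + c ∉ PySem.Set.ofList values := fun hq => hm (hc.mp hq)
        simp [h1, hm]
    have hstarts : (x :: rest).filter
        (fun n => !((x :: rest).contains (n - 1))) = x :: pvSt x rest := by
      have hxout : x - 1 ∉ x :: rest := by
        intro hc
        rcases List.mem_cons.mp hc with h1 | h1
        · omega
        · have := (List.pairwise_cons.mp hpair).1 _ h1; omega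
      rw [List.filter_cons_of_pos (by simp [hxout])]
      rw [pv_filter_starts (x :: rest) hpair rest [] x rfl]
    have hends : (x :: rest).filter
        (fun n => !((x :: rest).contains (n + 1))) = pvEn x rest := by
      exact pv_filter_ends (x :: rest) hpair rest [] x rfl
    have hf1 : (fun n : Int => !(PySem.Set.contains (PySem.Set.ofList values) (n - 1)))
        = (fun n : Int => !((x :: rest).contains (n - 1))) := by
      have := hfun (-1); simpa [sub_eq_add_neg] using this
    have hf2 := hfun 1
    rw [hf1, hf2, hstarts, hends]
    have h := pv_loop_zip rest [] x x
    simp only [List.nil_append, pvFlushA, pvFmtPair] at h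
    rw [← h]
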